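-- pv_equiv track=rewrite | github.com/ScaDS/scadsai_room_booking | src/scadsai_room_booking/_utilities.py | parse_owner
-- ===== SOURCE A (Python) =====
-- def parse_owner(summary):
--
--     summary = summary.replace("Organization:", ",").\
--                 replace("Organized by:", ","). \
--                 replace("Contact:", ",")
--
--     if ":" in summary:
--         temp = summary.split(":")[-1].strip()
--     elif "\\" in summary:
--         temp = summary.split("\\")[-1].strip()
--     elif "(" in summary:
--         temp = summary.split("(")[-1].replace(")", "").strip()
--     elif "/" in summary:
--         temp = summary.split("/")[-1].strip()
--     elif "," in summary:
--         temp = summary.split(",")[-1].strip()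
--     else:
--         return summary.strip().split(" ")[-1]
--
--     if "," in temp or ":" in temp or len(temp.split(" ")) > 3:
--         return parse_owner(temp)
--     else:
--         return temp
-- ===== SOURCE B (Python) =====
-- DELIMS = ((":", False), ("\\", False), ("(", True), ("/", False), (",", False))
--
-- def parse_owner(summary):
--     while True:
--         s = summary.replace("Organization:", ",") \
--                    .replace("Organized by:", ",") \
--                    .replace("Contact:", ",")
--         for d, drop_paren in DELIMS:
--             if d in s:
--                 temp = s.split(d)[-1]
--                 if drop_paren:
--                     temp = temp.replace(")", "")
--                 temp = temp.strip()
--                 break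
--         else:
--             return s.strip().split(" ")[-1]
--         if "," in temp or ":" in temp or len(temp.split(" ")) > 3:
--             summary = temp
--         else:
--             return temp
-- ===== Notes on version B (the rewrite author's own statement) =====
-- stated objective: alternative
-- what changed: Replaces A's self-recursion with an explicit while-True loop over a working string and replaces the five-branch elif chain with a single scan over a data table of (delimiter, post-process) pairs.
import Mathlib
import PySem

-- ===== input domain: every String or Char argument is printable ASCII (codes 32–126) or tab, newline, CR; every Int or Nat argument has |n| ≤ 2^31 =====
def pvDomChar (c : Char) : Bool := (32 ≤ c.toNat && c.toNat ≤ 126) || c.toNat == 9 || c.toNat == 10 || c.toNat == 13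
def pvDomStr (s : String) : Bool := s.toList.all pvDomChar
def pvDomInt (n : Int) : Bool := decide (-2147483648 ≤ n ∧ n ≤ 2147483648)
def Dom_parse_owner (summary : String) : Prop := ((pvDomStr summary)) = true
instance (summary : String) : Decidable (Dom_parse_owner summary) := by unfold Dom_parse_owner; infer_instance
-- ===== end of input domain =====

-- B replaces A's self-recursion by a while-loop over a working string with a data-driven
-- delimiter table instead of the elif chain; same return value, objective: alternative.
-- Both ports use fuel |summary|+1 (each Python pass strictly shortens the string, so the
-- fuel never runs out on real inputs; both ports share the same fuel-out fallback).

-- ===== PORT A =====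
-- last element of a Python split result (split never returns an empty list): lst[-1]
-- s.split(sep) for a nonempty literal sep (split? is none only for sep = "")
def pvSplit (s sep : String) : List String := (PySem.Str.split? s sep).getD []

def pvLast (l : List String) : String := ((PySem.List.pyGet? l (-1)).getD "")

-- literal transliteration of A: the three replaces, the elif chain, then the shared
-- check with self-recursion (`afterA` is A's final `if … return parse_owner(temp) else return temp`)
def parse_owner_go (fuel : Nat) (summary : String) : String :=
  match fuel with
  | 0 => summary
  | fuel + 1 =>
    let s := PySem.Str.replace (PySem.Str.replace (PySem.Str.replace summary
               "Organization:" ",") "Organized by:" ",") "Contact:" ","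
    let afterA : String → String := fun temp =>
      if PySem.Str.isIn "," temp || PySem.Str.isIn ":" temp
          || (pvSplit temp " ").length > 3 then
        parse_owner_go fuel temp
      else temp
    if PySem.Str.isIn ":" s then
      afterA (PySem.Str.strip (pvLast (pvSplit s ":")))
    else if PySem.Str.isIn "\\" s then
      afterA (PySem.Str.strip (pvLast (pvSplit s "\\")))
    else if PySem.Str.isIn "(" s then
      afterA (PySem.Str.strip (PySem.Str.replace (pvLast (pvSplit s "(")) ")" ""))
    else if PySem.Str.isIn "/" s then
      afterA (PySem.Str.strip (pvLast (pvSplit s "/")))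
    else if PySem.Str.isIn "," s then
      afterA (PySem.Str.strip (pvLast (pvSplit s ",")))
    else
      pvLast (pvSplit (PySem.Str.strip s) " ")

def parse_owner (summary : String) : String :=
  parse_owner_go (summary.toList.length + 1) summary

-- ===== PORT B =====
-- B's delimiter table DELIMS
def pvDelims : List (String × Bool) :=
  [(":", false), ("\\", false), ("(", true), ("/", false), (",", false)]

-- B's `for d, drop_paren in DELIMS: … break / else:` — first delimiter found wins,
-- returning the fully post-processed `temp` (none = the for-else path)
def pvScan (ds : List (String × Bool)) (s : String) : Option String :=
  match ds with
  | [] => none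
  | (d, dropParen) :: rest =>
    if PySem.Str.isIn d s then
      some (PySem.Str.strip (if dropParen
          then PySem.Str.replace (pvLast (pvSplit s d)) ")" ""
          else pvLast (pvSplit s d)))
    else pvScan rest s

-- B's `while True:` loop over the working string
def parse_owner_loop (fuel : Nat) (summary : String) : String :=
  match fuel with
  | 0 => summary
  | fuel + 1 =>
    let s := PySem.Str.replace (PySem.Str.replace (PySem.Str.replace summary
               "Organization:" ",") "Organized by:" ",") "Contact:" ","
    match pvScan pvDelims s with
    | none => pvLast (pvSplit (PySem.Str.strip s) " ")
    | some temp =>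
      if PySem.Str.isIn "," temp || PySem.Str.isIn ":" temp
          || (pvSplit temp " ").length > 3 then
        parse_owner_loop fuel temp
      else temp

def parse_owner_alt (summary : String) : String :=
  parse_owner_loop (summary.toList.length + 1) summary

-- ===== PRECONDITION & SPEC =====
def Spec_parse_owner (summary : String) (out : String) : Prop := out = parse_owner_alt summary
instance (summary : String) (out : String) : Decidable (Spec_parse_owner summary out) := by unfold Spec_parse_owner; infer_instance

-- ===== CLAIM (what is proved, stated in full; the proofs are below) =====
def Claim_equal_parse_owner : Prop := ∀ (summary : String), Dom_parse_owner summary → Spec_parse_owner summary (parse_owner summary)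

-- ===== LEMMAS AND PROOFS =====
theorem parse_owner_go_eq_loop (fuel : Nat) (summary : String) :
    parse_owner_go fuel summary = parse_owner_loop fuel summary := by
  induction fuel generalizing summary with
  | zero => rfl
  | succ n ih =>
    unfold parse_owner_go parse_owner_loop
    simp only [pvScan, pvDelims, reduceIte]
    generalize (PySem.Str.replace (PySem.Str.replace (PySem.Str.replace summary
               "Organization:" ",") "Organized by:" ",") "Contact:" ",") = s
    split_ifs <;> dsimp only <;> simp_all only [reduceIte] <;> first | rfl | exact ih _

-- ===== VERDICT (by name: the statement is the Claim_ definition above) =====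
theorem parse_owner_spec : Claim_equal_parse_owner := by
  intro summary _
  unfold Spec_parse_owner parse_owner parse_owner_alt
  exact parse_owner_go_eq_loop _ _
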